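-- pv_equiv track=rewrite | github.com/renpe/euler-brick-obstructions | paper4/migration/pub_migrate.py | gen_lenhart
-- ===== SOURCE A (Python) =====
-- from math import isqrt, gcd
--
-- def is_square(n):
--     if n <= 0: return n == 0
--     r = isqrt(n)
--     return r * r == n
--
-- def primitive_brick(e1, e2, e3):
--     g = gcd(gcd(abs(e1), abs(e2)), abs(e3))
--     if g == 0: return None
--     return tuple(sorted([abs(e1)//g, abs(e2)//g, abs(e3)//g]))
--
-- def gen_lenhart(max_w):
--     bricks = set()
--     for w in range(1, max_w+1):
--         target = 5*w*w
--         for u in range(w+1, isqrt(target)+1):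
--             v_sq = target - u*u
--             if v_sq <= w*w: continue
--             if not is_square(v_sq): continue
--             v = isqrt(v_sq)
--             if v <= w: continue
--             a = (u*u-w*w)*(v*v-w*w); b = 4*u*v*w*w
--             for c in (2*u*w*(v*v-w*w), 2*v*w*(u*u-w*w)):
--                 if a > 0 and b > 0 and c > 0:
--                     br = primitive_brick(a, b, c)
--                     if br and is_square(a*a+b*b) and is_square(a*a+c*c) and is_square(b*b+c*c):
--                         bricks.add(br)
--     return bricks
-- ===== SOURCE B (Python) =====
-- from math import isqrt, gcd
--
-- def is_square(n):
--     if n <= 0: return n == 0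
--     r = isqrt(n)
--     return r * r == n
--
-- def primitive_brick(e1, e2, e3):
--     g = gcd(gcd(abs(e1), abs(e2)), abs(e3))
--     if g == 0: return None
--     return tuple(sorted([abs(e1)//g, abs(e2)//g, abs(e3)//g]))
--
-- def _add_bricks(bricks, w, u, v):
--     a = (u*u - w*w) * (v*v - w*w)
--     b = 4*u*v*w*w
--     for c in (2*u*w*(v*v - w*w), 2*v*w*(u*u - w*w)):
--         br = primitive_brick(a, b, c)
--         if br and is_square(a*a + b*b) and is_square(a*a + c*c) and is_square(b*b + c*c):
--             bricks.add(br)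
--
-- def gen_lenhart(max_w):
--     # Two-pointer walk on the circle u^2 + v^2 = 5*w^2: u ascends, v descends,
--     # each representation with u <= v is found once, with O(1) work per step
--     # (no isqrt / perfect-square test inside the loop).
--     bricks = set()
--     for w in range(1, max_w + 1):
--         target = 5 * w * w
--         u = w + 1
--         v = isqrt(target)
--         while u <= v:
--             s = u * u + v * v
--             if s < target:
--                 u += 1
--             elif s > target:
--                 v -= 1
--             else:
--                 _add_bricks(bricks, w, u, v)
--                 u += 1
--                 v -= 1
--     return bricks
-- ===== Notes on version B (the rewrite author's own statement) =====
-- stated objective: faster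
-- what changed: Replaces A's scan of every u with an isqrt-based perfect-square test per step (which visits each unordered representation {u,v} of 5w^2 = u^2+v^2 twice and relies on set dedup) by a two-pointer walk (u ascending, v descending) that finds each representation with u<=v exactly once using O(1) integer arithmetic per step; intended as faster, measured ~1.7-2.2x on sizes where both finish.
import Mathlib
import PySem

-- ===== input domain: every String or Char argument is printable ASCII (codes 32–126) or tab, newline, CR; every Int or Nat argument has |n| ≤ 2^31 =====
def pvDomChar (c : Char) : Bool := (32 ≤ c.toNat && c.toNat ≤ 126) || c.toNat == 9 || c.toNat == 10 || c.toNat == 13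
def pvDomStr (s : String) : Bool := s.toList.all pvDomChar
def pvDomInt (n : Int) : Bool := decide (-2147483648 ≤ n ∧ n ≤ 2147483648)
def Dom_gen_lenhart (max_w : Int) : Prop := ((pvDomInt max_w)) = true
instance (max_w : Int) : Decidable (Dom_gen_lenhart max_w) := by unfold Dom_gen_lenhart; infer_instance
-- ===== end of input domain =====

-- B replaces A's per-u scan with an isqrt square test at every step by a two-pointer walk
-- on the circle u^2+v^2 = 5w^2 that meets each representation with u ≤ v once (intended as faster; measured ~1.7-2.2x).

-- ===== PORT A =====
-- math.isqrt, exact for n ≥ 0 (A only applies it to nonnegative arguments)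
def pyIsqrt (n : Int) : Int := (Nat.sqrt n.toNat : Int)

def is_square (n : Int) : Bool :=
  if n ≤ 0 then n == 0
  else
    let r := pyIsqrt n
    r * r == n

def primitive_brick (e1 e2 e3 : Int) : Option (List Int) :=
  let g : Nat := Nat.gcd (Nat.gcd e1.natAbs e2.natAbs) e3.natAbs
  if g = 0 then none
  else some (PySem.List.sorted [((e1.natAbs / g : Nat) : Int), ((e2.natAbs / g : Nat) : Int), ((e3.natAbs / g : Nat) : Int)] (fun x => x) false)

def gen_lenhart (max_w : Int) : List (List Int) :=
  (PySem.List.pyRange 1 (max_w + 1) 1).foldl (fun bricks w =>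
    let target := 5 * w * w
    (PySem.List.pyRange (w + 1) (pyIsqrt target + 1) 1).foldl (fun bricks u =>
      let v_sq := target - u * u
      if v_sq ≤ w * w then bricks
      else if !is_square v_sq then bricks
      else
        let v := pyIsqrt v_sq
        if v ≤ w then bricks
        else
          let a := (u * u - w * w) * (v * v - w * w)
          let b := 4 * u * v * w * w
          [2 * u * w * (v * v - w * w), 2 * v * w * (u * u - w * w)].foldl (fun bricks c =>
            if a > 0 ∧ b > 0 ∧ c > 0 then
              match primitive_brick a b c with
              | none => bricks
              | some br =>
                if is_square (a * a + b * b) && is_square (a * a + c * c) && is_square (b * b + c * c) then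
                  PySem.Set.add bricks br
                else bricks
            else bricks) bricks) bricks) PySem.Set.empty

-- ===== PORT B =====
def addBricks (bricks : List (List Int)) (w u v : Int) : List (List Int) :=
  let a := (u * u - w * w) * (v * v - w * w)
  let b := 4 * u * v * w * w
  [2 * u * w * (v * v - w * w), 2 * v * w * (u * u - w * w)].foldl (fun bricks c =>
    match primitive_brick a b c with
    | none => bricks
    | some br =>
      if is_square (a * a + b * b) && is_square (a * a + c * c) && is_square (b * b + c * c) then
        PySem.Set.add bricks br
      else bricks) bricks

def twoPtr (w target u v : Int) (bricks : List (List Int)) : List (List Int) :=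
  if u ≤ v then
    let s := u * u + v * v
    if s < target then twoPtr w target (u + 1) v bricks
    else if s > target then twoPtr w target u (v - 1) bricks
    else twoPtr w target (u + 1) (v - 1) (addBricks bricks w u v)
  else bricks
termination_by (v + 1 - u).toNat
decreasing_by all_goals omega

def gen_lenhart_alt (max_w : Int) : List (List Int) :=
  (PySem.List.pyRange 1 (max_w + 1) 1).foldl (fun bricks w =>
    let target := 5 * w * w
    twoPtr w target (w + 1) (pyIsqrt target) bricks) PySem.Set.empty

-- ===== PRECONDITION & SPEC =====
def Spec_gen_lenhart (max_w : Int) (out : List (List Int)) : Prop := out = gen_lenhart_alt max_w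
instance (max_w : Int) (out : List (List Int)) : Decidable (Spec_gen_lenhart max_w out) := by unfold Spec_gen_lenhart; infer_instance

-- ===== CLAIM (what is proved, stated in full; the proofs are below) =====
def Claim_equal_gen_lenhart : Prop := ∀ (max_w : Int), Dom_gen_lenhart max_w → Spec_gen_lenhart max_w (gen_lenhart max_w)

-- ===== LEMMAS AND PROOFS =====

-- A's inner-loop body, named for the proofs (definitionally A's lambda)
def stepA (w : Int) (bricks : List (List Int)) (u : Int) : List (List Int) :=
  let target := 5 * w * w
  let v_sq := target - u * u
  if v_sq ≤ w * w then bricks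
  else if !is_square v_sq then bricks
  else
    let v := pyIsqrt v_sq
    if v ≤ w then bricks
    else
      let a := (u * u - w * w) * (v * v - w * w)
      let b := 4 * u * v * w * w
      [2 * u * w * (v * v - w * w), 2 * v * w * (u * u - w * w)].foldl (fun bricks c =>
        if a > 0 ∧ b > 0 ∧ c > 0 then
          match primitive_brick a b c with
          | none => bricks
          | some br =>
            if is_square (a * a + b * b) && is_square (a * a + c * c) && is_square (b * b + c * c) then
              PySem.Set.add bricks br
            else bricks
        else bricks) bricks

lemma gen_lenhart_eq (max_w : Int) :
    gen_lenhart max_w =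
      (PySem.List.pyRange 1 (max_w + 1) 1).foldl (fun bricks w =>
        (PySem.List.pyRange (w + 1) (pyIsqrt (5 * w * w) + 1) 1).foldl (stepA w) bricks) [] := rfl

-- hit at column u (for w ≥ 1, u > w this is exactly "A's three guards pass")
def IsHit (w u : Int) : Prop :=
  w * w < 5 * w * w - u * u ∧
    pyIsqrt (5 * w * w - u * u) * pyIsqrt (5 * w * w - u * u) = 5 * w * w - u * u

-- the bricks a hit (u,v) contributes (proof-side abstraction of addBricks)
def candList (a b : Int) (cs : List Int) : List (List Int) :=
  cs.filterMap (fun c =>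
    match primitive_brick a b c with
    | none => none
    | some br =>
      if is_square (a * a + b * b) && is_square (a * a + c * c) && is_square (b * b + c * c) then
        some br
      else none)

def addedBricks (w u v : Int) : List (List Int) :=
  candList ((u * u - w * w) * (v * v - w * w)) (4 * u * v * w * w)
    [2 * u * w * (v * v - w * w), 2 * v * w * (u * u - w * w)]

-- the first-half hits (u ≤ v) from column u0 upward, in A's discovery order
def halfHits (w u0 : Int) : List (Int × Int) :=
  (PySem.List.pyRange u0 (pyIsqrt (5 * w * w) + 1) 1).filterMap (fun x =>
    let vs := 5 * w * w - x * x
    let v := pyIsqrt vs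
    if 2 * x * x ≤ 5 * w * w ∧ v * v = vs then some (x, v) else none)

-- ---- pyIsqrt facts ----
lemma pyIsqrt_nonneg (n : Int) : 0 ≤ pyIsqrt n := by
  simp [pyIsqrt]

lemma pyIsqrt_sq {v : Int} (h : 0 ≤ v) : pyIsqrt (v * v) = v := by
  obtain ⟨m, rfl⟩ := Int.eq_ofNat_of_zero_le h
  have h1 : ((m : Int) * m).toNat = m * m := by
    rw [← Int.natCast_mul, Int.toNat_natCast]
  simp [pyIsqrt, h1]

lemma pyIsqrt_mono {m n : Int} (h : m ≤ n) : pyIsqrt m ≤ pyIsqrt n := by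
  have h0 : m.toNat ≤ n.toNat := by omega
  have := Nat.sqrt_le_sqrt h0
  simp only [pyIsqrt]
  omega

lemma le_pyIsqrt {x n : Int} (hx : 0 ≤ x) (h : x * x ≤ n) : x ≤ pyIsqrt n := by
  have := pyIsqrt_mono h
  rwa [pyIsqrt_sq hx] at this

lemma lt_of_sq_lt_sq {a b : Int} (hb : 0 ≤ b) (h : a * a < b * b) : a < b := by
  nlinarith

lemma is_square_iff {n : Int} (h : 0 < n) : is_square n = (decide (pyIsqrt n * pyIsqrt n = n)) := by
  simp only [is_square]
  rw [if_neg (by omega)]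
  by_cases hx : pyIsqrt n * pyIsqrt n = n <;> simp [hx]

-- ---- the per-hit action ----
lemma candList_cons (a b c : Int) (cs : List Int) :
    candList a b (c :: cs) =
      (match primitive_brick a b c with
       | none => []
       | some br =>
         if is_square (a * a + b * b) && is_square (a * a + c * c) && is_square (b * b + c * c) then
           [br]
         else []) ++ candList a b cs := by
  cases h : primitive_brick a b c with
  | none => simp [candList, h]
  | some br =>
    cases hb1 : is_square (a * a + b * b) <;> cases hb2 : is_square (a * a + c * c) <;>
      cases hb3 : is_square (b * b + c * c) <;> simp [candList, h, hb1, hb2, hb3]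

lemma foldl_cond_eq_foldl_add (a b : Int) (cs : List Int) (acc : PySem.Set (List Int)) :
    cs.foldl (fun bricks c =>
      match primitive_brick a b c with
      | none => bricks
      | some br =>
        if is_square (a * a + b * b) && is_square (a * a + c * c) && is_square (b * b + c * c) then
          PySem.Set.add bricks br
        else bricks) acc = (candList a b cs).foldl PySem.Set.add acc := by
  induction cs generalizing acc with
  | nil => simp [candList]
  | cons c cs ih =>
    rw [candList_cons]
    cases h : primitive_brick a b c with
    | none => simpa [h] using ih acc
    | some br =>
      cases hc : (is_square (a * a + b * b) && is_square (a * a + c * c) && is_square (b * b + c * c)) with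
      | true =>
        simp only [h, hc, if_true, List.foldl_append, List.foldl]
        exact ih (PySem.Set.add acc br)
      | false =>
        simp only [List.foldl_cons, h, hc, Bool.false_eq_true, if_false, List.nil_append]
        exact ih acc

lemma addBricks_eq_foldl (acc : PySem.Set (List Int)) (w u v : Int) :
    addBricks acc w u v = (addedBricks w u v).foldl PySem.Set.add acc := by
  simp only [addBricks, addedBricks]
  exact foldl_cond_eq_foldl_add _ _ _ acc

lemma mem_foldl_add_iff (l : List (List Int)) (acc : PySem.Set (List Int)) (x : List Int) :
    x ∈ l.foldl PySem.Set.add acc ↔ x ∈ acc ∨ x ∈ l := by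
  induction l generalizing acc with
  | nil => simp
  | cons y l ih =>
    simp [List.foldl_cons, ih, PySem.Set.mem_add]
    tauto

lemma foldl_add_of_subset {l : List (List Int)} {acc : PySem.Set (List Int)}
    (h : ∀ x ∈ l, x ∈ acc) : l.foldl PySem.Set.add acc = acc := by
  induction l with
  | nil => rfl
  | cons y l ih =>
    rw [List.foldl_cons, PySem.Set.add_of_mem (h y (by simp))]
    exact ih (fun x hx => h x (by simp [hx]))

lemma mem_addBricks (acc : PySem.Set (List Int)) (w u v : Int) (x : List Int) :
    x ∈ addBricks acc w u v ↔ x ∈ acc ∨ x ∈ addedBricks w u v := by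
  rw [addBricks_eq_foldl]
  exact mem_foldl_add_iff _ _ _

lemma addBricks_of_subset {acc : PySem.Set (List Int)} {w u v : Int}
    (h : ∀ x ∈ addedBricks w u v, x ∈ acc) : addBricks acc w u v = acc := by
  rw [addBricks_eq_foldl]
  exact foldl_add_of_subset h

lemma mem_addedBricks_swap (w u v : Int) (x : List Int) :
    x ∈ addedBricks w v u ↔ x ∈ addedBricks w u v := by
  have e1 : (v * v - w * w) * (u * u - w * w) = (u * u - w * w) * (v * v - w * w) := by ring
  have e2 : 4 * v * u * w * w = 4 * u * v * w * w := by ring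
  simp only [addedBricks, e1, e2, candList, List.mem_filterMap, List.mem_cons,
    List.not_mem_nil, or_false]
  constructor
  · rintro ⟨c, hc, h⟩
    exact ⟨c, by tauto, h⟩
  · rintro ⟨c, hc, h⟩
    exact ⟨c, by tauto, h⟩

-- ---- stepA characterization ----
lemma foldl_guard_eq (a b : Int) (cs : List Int) (acc : PySem.Set (List Int))
    (h : ∀ c ∈ cs, a > 0 ∧ b > 0 ∧ c > 0) :
    cs.foldl (fun bricks c =>
      if a > 0 ∧ b > 0 ∧ c > 0 then
        match primitive_brick a b c with
        | none => bricks
        | some br =>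
          if is_square (a * a + b * b) && is_square (a * a + c * c) && is_square (b * b + c * c) then
            PySem.Set.add bricks br
          else bricks
      else bricks) acc =
    cs.foldl (fun bricks c =>
      match primitive_brick a b c with
      | none => bricks
      | some br =>
        if is_square (a * a + b * b) && is_square (a * a + c * c) && is_square (b * b + c * c) then
          PySem.Set.add bricks br
        else bricks) acc := by
  induction cs generalizing acc with
  | nil => rfl
  | cons c cs ih =>
    rw [List.foldl_cons, List.foldl_cons, if_pos (h c (by simp))]
    exact ih _ (fun c hc => h c (by simp [hc]))

lemma stepA_miss {w u : Int} (bricks : PySem.Set (List Int))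
    (h : ¬ IsHit w u) : stepA w bricks u = bricks := by
  by_cases h1 : 5 * w * w - u * u ≤ w * w
  · simp [stepA, h1]
  · push Not at h1
    have hvs : 0 < 5 * w * w - u * u := by nlinarith
    have hsq := is_square_iff hvs
    have h2 : ¬ pyIsqrt (5 * w * w - u * u) * pyIsqrt (5 * w * w - u * u) = 5 * w * w - u * u :=
      fun hh => h ⟨h1, hh⟩
    have hb2 : is_square (5 * w * w - u * u) = false := by rw [hsq]; simp [h2]
    simp [stepA, h1.not_ge, hb2]

lemma stepA_hit {w u : Int} (hw : 1 ≤ w) (hu : w < u) (bricks : PySem.Set (List Int))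
    (h : IsHit w u) :
    stepA w bricks u = addBricks bricks w u (pyIsqrt (5 * w * w - u * u)) := by
  obtain ⟨h1, h2⟩ := h
  have hvs : 0 < 5 * w * w - u * u := by nlinarith
  have hsq := is_square_iff hvs
  set v := pyIsqrt (5 * w * w - u * u) with hvdef
  have hwv : w < v := lt_of_sq_lt_sq (pyIsqrt_nonneg _) (by rw [h2]; omega)
  have hb2 : is_square (5 * w * w - u * u) = true := by rw [hsq]; simp [h2]
  have hu0 : 0 < u := by omega
  have hv0 : 0 < v := by omega
  have hww : 0 < w := by omega
  have huu : w * w < u * u := by nlinarith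
  have hvv : w * w < v * v := by omega
  have h4 : (0 : Int) < 4 := by norm_num
  have hm2 : (0 : Int) < 2 := by norm_num
  have ha : 0 < (u * u - w * w) * (v * v - w * w) := mul_pos (by omega) (by omega)
  have hbpos : 0 < 4 * u * v * w * w :=
    mul_pos (mul_pos (mul_pos (mul_pos h4 hu0) hv0) hww) hww
  have hc1 : 0 < 2 * u * w * (v * v - w * w) :=
    mul_pos (mul_pos (mul_pos hm2 hu0) hww) (by omega)
  have hc2 : 0 < 2 * v * w * (u * u - w * w) :=
    mul_pos (mul_pos (mul_pos hm2 hv0) hww) (by omega)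
  simp only [stepA, addBricks]
  rw [if_neg (by omega), if_neg (by simp [hb2]), if_neg (by omega)]
  exact foldl_guard_eq _ _ _ bricks (by
    intro c hc
    simp only [List.mem_cons, List.not_mem_nil, or_false] at hc
    refine ⟨ha, hbpos, ?_⟩
    rcases hc with rfl | rfl
    · exact hc1
    · exact hc2)

-- ---- halfHits unfolding ----
lemma halfHits_nil {w u0 : Int} (h : pyIsqrt (5 * w * w) < u0) : halfHits w u0 = [] := by
  have : PySem.List.pyRange u0 (pyIsqrt (5 * w * w) + 1) 1 = [] := by
    rw [PySem.List.pyRange_one]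
    have : (pyIsqrt (5 * w * w) + 1 - u0).toNat = 0 := by omega
    simp [this]
  simp [halfHits, this]

lemma halfHits_cons {w u0 : Int} (h : u0 ≤ pyIsqrt (5 * w * w)) :
    halfHits w u0 =
      (if 2 * u0 * u0 ≤ 5 * w * w ∧
          pyIsqrt (5 * w * w - u0 * u0) * pyIsqrt (5 * w * w - u0 * u0) = 5 * w * w - u0 * u0 then
        [(u0, pyIsqrt (5 * w * w - u0 * u0))]
      else []) ++ halfHits w (u0 + 1) := by
  rw [halfHits, PySem.List.pyRange_one_cons (by omega), List.filterMap_cons]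
  split_ifs with hc
  · simp only [hc, and_self]
    rfl
  · simp only [if_neg hc]
    rfl

-- ---- the two-pointer walk computes the fold over the first-half hits ----
lemma twoPtr_eq (w : Int) (hw : 1 ≤ w) :
    ∀ (n : Nat) (u v : Int) (acc : PySem.Set (List Int)), (v + 1 - u).toNat ≤ n →
      w + 1 ≤ u → v ≤ pyIsqrt (5 * w * w) →
      (∀ y : Int, v < y → y ≤ pyIsqrt (5 * w * w) → 5 * w * w - y * y < u * u) →
      twoPtr w (5 * w * w) u v acc =
        (halfHits w u).foldl (fun a p => addBricks a w p.1 p.2) acc := by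
  intro n
  induction n with
  | zero =>
    intro u v acc hfuel hu hvX hInv
    have huv : v < u := by omega
    rw [twoPtr]
    rw [if_neg (by omega)]
    have hnil : halfHits w u = [] := by
      rw [halfHits, List.filterMap_eq_nil_iff]
      intro x hx
      rw [PySem.List.mem_pyRange_one] at hx
      simp only
      rw [if_neg]
      rintro ⟨hhalf, hsq⟩
      have hx0 : (0 : Int) ≤ x := by omega
      have hxv : x ≤ pyIsqrt (5 * w * w - x * x) := le_pyIsqrt hx0 (by linarith)
      have hvle : pyIsqrt (5 * w * w - x * x) ≤ pyIsqrt (5 * w * w) :=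
        pyIsqrt_mono (by nlinarith [mul_self_nonneg x])
      have hgt : v < pyIsqrt (5 * w * w - x * x) := by omega
      have := hInv _ hgt hvle
      rw [hsq] at this
      have hux : u * u ≤ x * x := mul_le_mul (by omega) (by omega) (by omega) (by omega)
      omega
    rw [hnil]
    rfl
  | succ m ih =>
    intro u v acc hfuel hu hvX hInv
    by_cases huv : u ≤ v
    swap
    · rw [twoPtr, if_neg huv]
      have hnil : halfHits w u = [] := by
        rw [halfHits, List.filterMap_eq_nil_iff]
        intro x hx
        rw [PySem.List.mem_pyRange_one] at hx
        simp only
        rw [if_neg]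
        rintro ⟨hhalf, hsq⟩
        have hx0 : (0 : Int) ≤ x := by omega
        have hxv : x ≤ pyIsqrt (5 * w * w - x * x) := le_pyIsqrt hx0 (by linarith)
        have hvle : pyIsqrt (5 * w * w - x * x) ≤ pyIsqrt (5 * w * w) :=
          pyIsqrt_mono (by nlinarith [mul_self_nonneg x])
        have hgt : v < pyIsqrt (5 * w * w - x * x) := by omega
        have := hInv _ hgt hvle
        rw [hsq] at this
        have hux : u * u ≤ x * x := mul_le_mul (by omega) (by omega) (by omega) (by omega)
        omega
      rw [hnil]
      rfl
    · have hu0 : (0 : Int) < u := by omega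
      have huX : u ≤ pyIsqrt (5 * w * w) := le_trans huv hvX
      rw [twoPtr, if_pos huv]
      by_cases hs1 : u * u + v * v < 5 * w * w
      · rw [if_pos hs1]
        have hnone : halfHits w u = halfHits w (u + 1) := by
          rw [halfHits_cons huX, if_neg, List.nil_append]
          rintro ⟨hhalf, hsq⟩
          have hvv : v * v < pyIsqrt (5 * w * w - u * u) * pyIsqrt (5 * w * w - u * u) := by
            rw [hsq]; linarith
          have hv0 : (0 : Int) ≤ v := by omega
          have hlt : v < pyIsqrt (5 * w * w - u * u) :=
            lt_of_sq_lt_sq (pyIsqrt_nonneg _) hvv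
          have hvle : pyIsqrt (5 * w * w - u * u) ≤ pyIsqrt (5 * w * w) :=
            pyIsqrt_mono (by nlinarith [mul_self_nonneg u])
          have := hInv _ hlt hvle
          rw [hsq] at this
          omega
        rw [hnone]
        exact ih (u + 1) v acc (by omega) (by omega) hvX (by
          intro y hy1 hy2
          have := hInv y hy1 hy2
          nlinarith)
      · rw [if_neg hs1]
        by_cases hs2 : 5 * w * w < u * u + v * v
        · rw [if_pos hs2]
          exact ih u (v - 1) acc (by omega) hu (by omega) (by
            intro y hy1 hy2
            by_cases hyv : y = v
            · subst hyv; linarith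
            · exact hInv y (by omega) hy2)
        · rw [if_neg hs2]
          have hs : u * u + v * v = 5 * w * w := by omega
          have hv0 : (0 : Int) ≤ v := by omega
          have hvvsq : 5 * w * w - u * u = v * v := by linarith
          have hhead : halfHits w u = (u, v) :: halfHits w (u + 1) := by
            rw [halfHits_cons huX, if_pos, List.singleton_append, hvvsq, pyIsqrt_sq hv0]
            constructor
            · nlinarith [mul_le_mul huv huv (by omega : (0:Int) ≤ u) hv0]
            · rw [hvvsq, pyIsqrt_sq hv0]
          rw [hhead, List.foldl_cons]
          exact ih (u + 1) (v - 1) (addBricks acc w u v) (by omega) (by omega) (by omega) (by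
            intro y hy1 hy2
            by_cases hyv : y = v
            · subst hyv; nlinarith
            · have := hInv y (by omega) hy2
              nlinarith)

-- ---- A's scan computes the same fold: the second-half hits only revisit mirrored bricks ----
lemma foldA_eq (w : Int) (hw : 1 ≤ w) :
    ∀ (n : Nat) (u0 : Int) (acc : PySem.Set (List Int)),
      (pyIsqrt (5 * w * w) + 1 - u0).toNat ≤ n → w + 1 ≤ u0 →
      (∀ x, w + 1 ≤ x → x < u0 → 2 * x * x ≤ 5 * w * w → IsHit w x →
        ∀ br ∈ addedBricks w x (pyIsqrt (5 * w * w - x * x)), br ∈ acc) →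
      (PySem.List.pyRange u0 (pyIsqrt (5 * w * w) + 1) 1).foldl (stepA w) acc =
        (halfHits w u0).foldl (fun a p => addBricks a w p.1 p.2) acc := by
  intro n
  induction n with
  | zero =>
    intro u0 acc hfuel hu hInvA
    have hX : pyIsqrt (5 * w * w) < u0 := by omega
    have h1 : PySem.List.pyRange u0 (pyIsqrt (5 * w * w) + 1) 1 = [] := by
      rw [PySem.List.pyRange_one]
      have : (pyIsqrt (5 * w * w) + 1 - u0).toNat = 0 := by omega
      simp [this]
    rw [h1, halfHits_nil hX]
    rfl
  | succ m ih =>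
    intro u0 acc hfuel hu hInvA
    by_cases hX : pyIsqrt (5 * w * w) < u0
    · have h1 : PySem.List.pyRange u0 (pyIsqrt (5 * w * w) + 1) 1 = [] := by
        rw [PySem.List.pyRange_one]
        have : (pyIsqrt (5 * w * w) + 1 - u0).toNat = 0 := by omega
        simp [this]
      rw [h1, halfHits_nil hX]
      rfl
    · push Not at hX
      rw [PySem.List.pyRange_one_cons (by omega), List.foldl_cons]
      by_cases hhit : IsHit w u0
      · rw [stepA_hit hw (by omega) acc hhit]
        obtain ⟨hgt, hsq⟩ := hhit
        set v0 := pyIsqrt (5 * w * w - u0 * u0) with hv0def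
        have hwv0 : w < v0 := lt_of_sq_lt_sq (pyIsqrt_nonneg _) (by rw [hsq]; omega)
        by_cases hhalf : 2 * u0 * u0 ≤ 5 * w * w
        · rw [halfHits_cons hX, if_pos ⟨hhalf, hsq⟩,
            List.singleton_append, List.foldl_cons]
          exact ih (u0 + 1) (addBricks acc w u0 v0) (by omega) (by omega) (by
            intro x hx1 hx2 hx3 hx4 br hbr
            rw [mem_addBricks]
            by_cases hxu : x = u0
            · subst hxu; right; exact hbr
            · left; exact hInvA x hx1 (by omega) hx3 hx4 br hbr)
        · push Not at hhalf
          -- the mirror column v0 < u0 was already processed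
          have hv0u : v0 * v0 = 5 * w * w - u0 * u0 := hsq
          have hu00 : (0 : Int) ≤ u0 := by omega
          have hvlt : v0 < u0 := lt_of_sq_lt_sq hu00 (by linarith)
          have hmir : 5 * w * w - v0 * v0 = u0 * u0 := by omega
          have hmirHit : IsHit w v0 := by
            constructor
            · rw [hmir]; nlinarith
            · rw [hmir, pyIsqrt_sq hu00]
          have hmirHalf : 2 * v0 * v0 ≤ 5 * w * w := by nlinarith
          have hmem := hInvA v0 (by omega) hvlt hmirHalf hmirHit
          rw [hmir, pyIsqrt_sq hu00] at hmem
          have hskip : addBricks acc w u0 v0 = acc := by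
            apply addBricks_of_subset
            intro x hx
            exact hmem x ((mem_addedBricks_swap w v0 u0 x).mp hx)
          rw [hskip, halfHits_cons hX, if_neg (fun hh => absurd hh.1 (by linarith)), List.nil_append]
          exact ih (u0 + 1) acc (by omega) (by omega) (by
            intro x hx1 hx2 hx3 hx4 br hbr
            by_cases hxu : x = u0
            · subst hxu; omega
            · exact hInvA x hx1 (by omega) hx3 hx4 br hbr)
      · rw [stepA_miss acc hhit, halfHits_cons hX, if_neg, List.nil_append]
        · exact ih (u0 + 1) acc (by omega) (by omega) (by
            intro x hx1 hx2 hx3 hx4 br hbr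
            by_cases hxu : x = u0
            · subst hxu; exact absurd hx4 hhit
            · exact hInvA x hx1 (by omega) hx3 hx4 br hbr)
        · rintro ⟨hhalf, hsq⟩
          exact hhit ⟨by nlinarith, hsq⟩

-- ===== VERDICT (by name: the statement is the Claim_ definition above) =====
theorem gen_lenhart_spec : Claim_equal_gen_lenhart := by
  unfold Claim_equal_gen_lenhart
  intro max_w _
  unfold Spec_gen_lenhart
  rw [gen_lenhart_eq]
  simp only [gen_lenhart_alt, PySem.Set.empty]
  apply PySem.List.foldl_congr_mem
  intro acc w hwmem
  rw [PySem.List.mem_pyRange_one] at hwmem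
  have hw : 1 ≤ w := hwmem.1
  rw [foldA_eq w hw (pyIsqrt (5 * w * w) + 1 - (w + 1)).toNat (w + 1) acc le_rfl le_rfl
    (by intro x hx1 hx2; omega)]
  exact (twoPtr_eq w hw (pyIsqrt (5 * w * w) + 1 - (w + 1)).toNat (w + 1)
    (pyIsqrt (5 * w * w)) acc (by omega) le_rfl le_rfl (by intro y hy1 hy2; omega)).symm
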